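-- pv_equiv track=rewrite | github.com/Matthew-Pidlysny/9-The-Final-Chapter | Solver (WIP)/workshops/workshop6_11.py | four_color_theorem_checker
-- ===== SOURCE A (Python) =====
-- from typing import List, Tuple, Dict, Any, Optional, Union, Callable
--
-- def four_color_theorem_checker(regions: List[Tuple[int, List[int]]]) -> bool:
--     """Check if map is 4-colorable (simplified)"""
--     # This is a simplified version
--     # Full implementation would require complex graph coloring algorithms
--     n = len(regions)
--     colors = [None] * n
--
--     def is_safe(region, color):
--         for neighbor in regions[region][1]:
--             if neighbor < n and colors[neighbor] == color:
--                 return False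
--         return True
--
--     def color_graph(region):
--         if region == n:
--             return True
--
--         for color in range(4):
--             if is_safe(region, color):
--                 colors[region] = color
--                 if color_graph(region + 1):
--                     return True
--                 colors[region] = None
--
--         return False
--
--     return color_graph(0)
-- ===== SOURCE B (Python) =====
-- def four_color_theorem_checker(regions):
--     """Check if map is 4-colorable (simplified) - iterative backtracking."""
--     n = len(regions)
--     colors = [None] * n
--     next_color = [0] * n
--     region = 0
--     while 0 <= region < n:
--         colors[region] = None
--         c = next_color[region]
--         while c < 4 and any(nb < n and colors[nb] == c for nb in regions[region][1]):
--             c += 1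
--         if c < 4:
--             colors[region] = c
--             next_color[region] = c + 1
--             region += 1
--         else:
--             next_color[region] = 0
--             region -= 1
--     return region == n
-- ===== Notes on version B (the rewrite author's own statement) =====
-- stated objective: alternative
-- what changed: The recursive backtracking (nested color_graph recursion) is replaced by an explicit iterative search over region indices with a per-region next-color resume array, pushing forward on a safe color and backtracking by resetting state and decrementing the region pointer.
import Mathlib
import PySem

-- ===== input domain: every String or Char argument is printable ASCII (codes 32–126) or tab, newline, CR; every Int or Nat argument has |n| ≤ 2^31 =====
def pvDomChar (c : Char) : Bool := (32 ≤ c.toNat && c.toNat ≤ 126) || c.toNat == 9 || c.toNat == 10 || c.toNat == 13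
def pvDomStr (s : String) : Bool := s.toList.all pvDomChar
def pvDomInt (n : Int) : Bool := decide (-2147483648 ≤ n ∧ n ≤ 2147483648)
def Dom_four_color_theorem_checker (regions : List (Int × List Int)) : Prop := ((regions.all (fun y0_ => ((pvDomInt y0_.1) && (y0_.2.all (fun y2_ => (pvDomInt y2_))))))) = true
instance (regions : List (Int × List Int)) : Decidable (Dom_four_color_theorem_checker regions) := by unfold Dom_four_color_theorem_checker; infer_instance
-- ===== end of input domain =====

-- B replaces A's recursive backtracking by an explicit iterative region-pointer search with a
-- per-region resume-color array (objective: alternative decomposition, same search order, no speed claim).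

-- ===== PORT A =====
-- is_safe(region, color): colors[neighbor] on a negative in-range index wraps (pyGet?);
-- an out-of-range index (neighbor < -n) raises IndexError in Python — excluded by Pre_ below;
-- here the getD makes the port total (the value there is never claimed).
def aSafe (N : Int) (colors : List (Option Int)) (nbrs : List Int) (color : Int) : Bool :=
  match nbrs with
  | [] => true
  | m :: rest =>
    if m < N && (((PySem.List.pyGet? colors m).getD none) == some color) then false
    else aSafe N colors rest color

mutual
-- color_graph(region): regions[region] is walked as the head of the remaining suffix
def aGo (N : Int) (suffix : List (Int × List Int)) (region : Nat) (colors : List (Option Int)) : Bool :=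
  match suffix with
  | [] => true
  | (_, nbrs) :: rest => aTry N nbrs rest region colors [0, 1, 2, 3]
termination_by (suffix.length, 5)

-- the 'for color in range(4)' loop of color_graph
def aTry (N : Int) (nbrs : List Int) (rest : List (Int × List Int)) (region : Nat) (colors : List (Option Int)) (cs : List Int) : Bool :=
  match cs with
  | [] => false
  | c :: cs' =>
    if aSafe N colors nbrs c then
      if aGo N rest (region + 1) (colors.set region (some c)) then true
      else aTry N nbrs rest region colors cs'
    else aTry N nbrs rest region colors cs'
termination_by (rest.length + 1, cs.length)
end

def four_color_theorem_checker (regions : List (Int × List Int)) : Bool :=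
  aGo (regions.length : Int) regions 0 (List.replicate regions.length none)

-- ===== PORT B =====
-- any(nb < n and colors[nb] == c for nb in regions[region][1])
def bConflict (N : Int) (colors : List (Option Int)) (nbrs : List Int) (c : Int) : Bool :=
  match nbrs with
  | [] => false
  | m :: rest =>
    if m < N && (((PySem.List.pyGet? colors m).getD none) == some c) then true
    else bConflict N colors rest c

-- the inner 'while c < 4 and any(...)' scan: first non-conflicting color ≥ c (or 4)
def bScan (N : Int) (colors : List (Option Int)) (nbrs : List Int) (c : Nat) : Nat :=
  if c < 4 then
    (if bConflict N colors nbrs (c : Int) then bScan N colors nbrs (c + 1) else c)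
  else c
termination_by 4 - c

-- the outer 'while 0 <= region < n' loop; fuel only makes it total (proved sufficient below)
def bLoop (regions : List (Int × List Int)) (N : Int) : Nat → Int → List (Option Int) → List Nat → Bool
  | 0, region, _, _ => region == N
  | fuel + 1, region, colors, next =>
    if 0 ≤ region && region < N then
      let r := region.toNat
      let colors1 := colors.set r none
      let nbrs := ((regions[r]?.getD (0, [])).2)
      let c := bScan N colors1 nbrs (next.getD r 0)
      if c < 4 then
        bLoop regions N fuel (region + 1) (colors1.set r (some (c : Int))) (next.set r (c + 1))
      else
        bLoop regions N fuel (region - 1) colors1 (next.set r 0)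
    else region == N

def four_color_theorem_checker_alt (regions : List (Int × List Int)) : Bool :=
  bLoop regions (regions.length : Int) (6 ^ (regions.length + 2)) 0
    (List.replicate regions.length none) (List.replicate regions.length 0)

-- ===== PRECONDITION & SPEC =====
-- Pre_ excludes inputs containing a neighbor index < -len(regions): indexing colors[neighbor]
-- there raises IndexError in Python (in both A and B) whenever the search reaches that region.
def Pre_four_color_theorem_checker (regions : List (Int × List Int)) : Prop :=
  ∀ p ∈ regions, ∀ m ∈ p.2, -(regions.length : Int) ≤ m

instance (regions : List (Int × List Int)) : Decidable (Pre_four_color_theorem_checker regions) := by unfold Pre_four_color_theorem_checker; infer_instance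

def pvWitness_four_color_theorem_checker : (List (Int × List Int)) := [(0, [1]), (1, [0])]

def Spec_four_color_theorem_checker (regions : List (Int × List Int)) (out : Bool) : Prop := out = four_color_theorem_checker_alt regions
instance (regions : List (Int × List Int)) (out : Bool) : Decidable (Spec_four_color_theorem_checker regions out) := by unfold Spec_four_color_theorem_checker; infer_instance

-- ===== CLAIM (what is proved, stated in full; the proofs are below) =====
def Claim_equal_four_color_theorem_checker : Prop := ∀ (regions : List (Int × List Int)), Dom_four_color_theorem_checker regions → Pre_four_color_theorem_checker regions → Spec_four_color_theorem_checker regions (four_color_theorem_checker regions)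

-- ===== LEMMAS AND PROOFS =====

-- [c, c+1, ..., 3] as Int colors
def cFrom : Nat → List Int
  | 0 => [0, 1, 2, 3]
  | 1 => [1, 2, 3]
  | 2 => [2, 3]
  | 3 => [3]
  | _ => []

def nbrsAt (regions : List (Int × List Int)) (r : Nat) : List Int :=
  (regions[r]?.getD (0, [])).2

-- the recursive A-side search 'resumed' at region r with resume colors next[r], cascading
-- backtracks down to region 0 — the functional meaning of one B-loop state
def casc (regions : List (Int × List Int)) (N : Int) : Nat → List (Option Int) → List Nat → Bool
  | 0, colors, next =>
      aTry N (nbrsAt regions 0) (regions.drop 1) 0 (colors.set 0 none) (cFrom (next.getD 0 0))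
  | r + 1, colors, next =>
      if aTry N (nbrsAt regions (r + 1)) (regions.drop (r + 2)) (r + 1)
           (colors.set (r + 1) none) (cFrom (next.getD (r + 1) 0)) then true
      else casc regions N r (colors.set (r + 1) none) (next.set (r + 1) 0)

-- termination measure for B's outer loop
def mu (n r : Nat) (next : List Nat) : Nat :=
  (Finset.range n).sum (fun i => (4 - next.getD i 0) * 6 ^ (n - i))
    + r + 4 * (Finset.range r).sum (fun j => 6 ^ (n - 1 - j))

-- ---- small list lemmas ----
theorem getD_set_ne {α : Type} (l : List α) (i j : Nat) (a d : α) (h : i ≠ j) :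
    (l.set i a).getD j d = l.getD j d := by
  induction l generalizing i j with
  | nil => simp
  | cons x xs ih =>
    cases i with
    | zero => cases j with
      | zero => exact absurd rfl h
      | succ j' => simp [List.getD]
    | succ i' => cases j with
      | zero => simp [List.getD]
      | succ j' => simpa [List.getD] using ih i' j' (by omega)

theorem getD_set_self_default {α : Type} (l : List α) (i : Nat) (a : α) :
    (l.set i a).getD i a = a := by
  induction l generalizing i with
  | nil => simp
  | cons x xs ih =>
    cases i with
    | zero => simp [List.getD]
    | succ i' => simpa [List.getD] using ih i'

theorem getD_set_self {α : Type} (l : List α) (i : Nat) (a d : α) (h : i < l.length) :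
    (l.set i a).getD i d = a := by
  induction l generalizing i with
  | nil => simp at h
  | cons x xs ih =>
    cases i with
    | zero => simp [List.getD]
    | succ i' => simpa [List.getD] using ih i' (by simpa using h)

theorem set_eq_of_getD {α : Type} (l : List α) (i : Nat) (a : α) (h : l.getD i a = a) :
    l.set i a = l := by
  induction l generalizing i with
  | nil => simp
  | cons x xs ih =>
    cases i with
    | zero => simp [List.getD] at h; simp [h]
    | succ i' => simp [List.getD] at h; simp [ih i' h]

theorem getD_replicate {α : Type} (n i : Nat) (a : α) :
    (List.replicate n a).getD i a = a := by
  induction n generalizing i with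
  | zero => simp
  | succ n' ih =>
    cases i with
    | zero => simp [List.getD]
    | succ i' => simp [List.replicate, List.getD]

-- ---- safe vs conflict ----
theorem aSafe_eq_not_conflict (N : Int) (colors : List (Option Int)) (nbrs : List Int) (c : Int) :
    aSafe N colors nbrs c = !bConflict N colors nbrs c := by
  induction nbrs with
  | nil => simp [aSafe, bConflict]
  | cons m rest ih =>
    by_cases h : (m < N && (((PySem.List.pyGet? colors m).getD none) == some c)) = true
    · simp [aSafe, bConflict, h]
    · simp [aSafe, bConflict, h, ih]

theorem cFrom_succ (c : Nat) (h : c < 4) : cFrom c = (c : Int) :: cFrom (c + 1) := by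
  interval_cases c <;> rfl

-- ---- scan lemmas ----
theorem bScan_ge (N : Int) (colors : List (Option Int)) (nbrs : List Int) :
    ∀ k c, c + k = 4 → c ≤ bScan N colors nbrs c := by
  intro k
  induction k with
  | zero => intro c hc; unfold bScan; simp [show ¬ c < 4 by omega]
  | succ k' ih =>
    intro c hc
    unfold bScan
    simp only [show c < 4 by omega, if_true]
    by_cases h : bConflict N colors nbrs (c : Int) = true
    · simp only [h, if_true]
      exact le_trans (by omega) (ih (c + 1) (by omega))
    · simp [h]

theorem bScan_le (N : Int) (colors : List (Option Int)) (nbrs : List Int) :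
    ∀ k c, c + k = 4 → bScan N colors nbrs c ≤ 4 := by
  intro k
  induction k with
  | zero => intro c hc; unfold bScan; simp [show ¬ c < 4 by omega]; omega
  | succ k' ih =>
    intro c hc
    unfold bScan
    simp only [show c < 4 by omega, if_true]
    by_cases h : bConflict N colors nbrs (c : Int) = true
    · simp only [h, if_true]; exact ih (c + 1) (by omega)
    · simp [h]; omega

theorem aTry_scan (N : Int) (colors : List (Option Int)) (nbrs : List Int)
    (rest : List (Int × List Int)) (r : Nat) :
    ∀ k c, c + k = 4 →
      aTry N nbrs rest r colors (cFrom c) =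
        (if bScan N colors nbrs c < 4 then
           (if aGo N rest (r + 1) (colors.set r (some ((bScan N colors nbrs c : Nat) : Int))) then true
            else aTry N nbrs rest r colors (cFrom (bScan N colors nbrs c + 1)))
         else false) := by
  intro k
  induction k with
  | zero =>
    intro c hc
    have hs : bScan N colors nbrs c = c := by unfold bScan; simp [show ¬ c < 4 by omega]
    have h4 : c = 4 := by omega
    subst h4
    simp [hs, cFrom, aTry]
  | succ k' ih =>
    intro c hc
    have hlt : c < 4 := by omega
    rw [cFrom_succ c hlt]
    by_cases h : bConflict N colors nbrs (c : Int) = true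
    · have hsafe : aSafe N colors nbrs (c : Int) = false := by
        rw [aSafe_eq_not_conflict, h]; rfl
      have hs : bScan N colors nbrs c = bScan N colors nbrs (c + 1) := by
        conv_lhs => unfold bScan
        simp [hlt, h]
      rw [hs]
      have := ih (c + 1) (by omega)
      simpa [aTry, hsafe] using this
    · have hsafe : aSafe N colors nbrs (c : Int) = true := by
        rw [aSafe_eq_not_conflict]
        simp [h]
      have hs : bScan N colors nbrs c = c := by
        conv_lhs => unfold bScan
        simp [hlt, h]
      rw [hs]
      simp only [aTry, hsafe, if_true, hlt]

-- ---- measure lemmas ----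
theorem mu_forward (n r c : Nat) (next : List Nat) (hr : r < n) (hlen : next.length = n)
    (hv : next.getD r 0 ≤ c) (hc : c ≤ 3) :
    mu n (r + 1) (next.set r (c + 1)) < mu n r next := by
  unfold mu
  have hmem : r ∈ Finset.range n := Finset.mem_range.mpr hr
  have hdiff : ∀ x ∈ Finset.range n \ {r},
      (4 - (next.set r (c + 1)).getD x 0) * 6 ^ (n - x) = (4 - next.getD x 0) * 6 ^ (n - x) := by
    intro x hx
    have hne : r ≠ x := by
      rcases Finset.mem_sdiff.mp hx with ⟨-, hx2⟩
      simp at hx2; omega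
    rw [getD_set_ne _ _ _ _ _ hne]
  rw [Finset.sum_eq_sum_diff_singleton_add hmem
        (fun i => (4 - (next.set r (c + 1)).getD i 0) * 6 ^ (n - i)),
      Finset.sum_eq_sum_diff_singleton_add hmem
        (fun i => (4 - next.getD i 0) * 6 ^ (n - i)),
      Finset.sum_congr rfl hdiff, Finset.sum_range_succ]
  rw [getD_set_self next r (c + 1) 0 (by omega)]
  have hX : 6 ^ (n - r) = 6 ^ (n - 1 - r) * 6 := by rw [← pow_succ]; congr 1; omega
  have hW : 1 ≤ 6 ^ (n - 1 - r) := Nat.one_le_pow _ _ (by norm_num)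
  have hAB : (4 - (c + 1)) * 6 ^ (n - r) + 6 ^ (n - r) ≤ (4 - next.getD r 0) * 6 ^ (n - r) := by
    have h1 : (4 - (c + 1)) + 1 ≤ 4 - next.getD r 0 := by omega
    calc (4 - (c + 1)) * 6 ^ (n - r) + 6 ^ (n - r)
        = ((4 - (c + 1)) + 1) * 6 ^ (n - r) := by ring
      _ ≤ (4 - next.getD r 0) * 6 ^ (n - r) := Nat.mul_le_mul_right _ h1
  omega

theorem mu_backward (n r' : Nat) (next : List Nat) (hr : r' + 1 < n) :
    mu n r' (next.set (r' + 1) 0) < mu n (r' + 1) next := by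
  unfold mu
  have hmem : r' + 1 ∈ Finset.range n := Finset.mem_range.mpr hr
  have hdiff : ∀ x ∈ Finset.range n \ {r' + 1},
      (4 - (next.set (r' + 1) 0).getD x 0) * 6 ^ (n - x) = (4 - next.getD x 0) * 6 ^ (n - x) := by
    intro x hx
    have hne : r' + 1 ≠ x := by
      rcases Finset.mem_sdiff.mp hx with ⟨-, hx2⟩
      simp at hx2; omega
    rw [getD_set_ne _ _ _ _ _ hne]
  rw [Finset.sum_eq_sum_diff_singleton_add hmem
        (fun i => (4 - (next.set (r' + 1) 0).getD i 0) * 6 ^ (n - i)),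
      Finset.sum_eq_sum_diff_singleton_add hmem
        (fun i => (4 - next.getD i 0) * 6 ^ (n - i)),
      Finset.sum_congr rfl hdiff, Finset.sum_range_succ]
  rw [getD_set_self_default next (r' + 1) 0]
  have heq : n - 1 - r' = n - (r' + 1) := by omega
  rw [heq]
  omega

theorem geo_le (n : Nat) : (Finset.range n).sum (fun j => 6 ^ j) ≤ 6 ^ n := by
  induction n with
  | zero => simp
  | succ n ih =>
    rw [Finset.sum_range_succ]
    have h6 : 6 ^ (n + 1) = 6 * 6 ^ n := by ring
    omega

theorem mu_init (n : Nat) : mu n 0 (List.replicate n 0) < 6 ^ (n + 2) := by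
  unfold mu
  simp only [Finset.range_zero, Finset.sum_empty, Nat.mul_zero, Nat.add_zero]
  have h0 : ∀ i ∈ Finset.range n,
      (4 - (List.replicate n 0).getD i 0) * 6 ^ (n - i) = 4 * 6 ^ (n - i) := by
    intro i _; rw [getD_replicate]
  rw [Finset.sum_congr rfl h0]
  have h2 : (Finset.range n).sum (fun i => 4 * 6 ^ (n - i))
      = (Finset.range n).sum (fun i => 4 * 6 ^ (i + 1)) := by
    rw [← Finset.sum_range_reflect]
    apply Finset.sum_congr rfl
    intro j hj
    have hj' := Finset.mem_range.mp hj
    have hnn : n - (n - 1 - j) = j + 1 := by omega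
    rw [hnn]
  rw [h2]
  have h3 : (Finset.range n).sum (fun i => 4 * 6 ^ (i + 1))
      = 24 * (Finset.range n).sum (fun i => 6 ^ i) := by
    rw [Finset.mul_sum]
    apply Finset.sum_congr rfl
    intro i _
    rw [pow_succ]; ring
  rw [h3]
  have h4 := geo_le n
  have h5 : 6 ^ (n + 2) = 36 * 6 ^ n := by rw [pow_add]; ring
  have h6 : 1 ≤ 6 ^ n := Nat.one_le_pow _ _ (by norm_num)
  omega

-- ---- unfolding lemmas for bLoop ----
theorem bLoop_succ_in (regions : List (Int × List Int)) (N : Int) (fuel : Nat) (r : Nat)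
    (colors : List (Option Int)) (next : List Nat) (hN : (r : Int) < N) :
    bLoop regions N (fuel + 1) (r : Int) colors next =
      (if bScan N (colors.set r none) (nbrsAt regions r) (next.getD r 0) < 4 then
         bLoop regions N fuel ((r : Int) + 1)
           ((colors.set r none).set r
             (some ((bScan N (colors.set r none) (nbrsAt regions r) (next.getD r 0) : Nat) : Int)))
           (next.set r (bScan N (colors.set r none) (nbrsAt regions r) (next.getD r 0) + 1))
       else bLoop regions N fuel ((r : Int) - 1) (colors.set r none) (next.set r 0)) := by
  have h0 : (0 : Int) ≤ (r : Int) := Int.natCast_nonneg r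
  simp only [bLoop, nbrsAt, h0, hN, decide_true, Bool.and_self, if_true, Int.toNat_natCast]

theorem bLoop_done (regions : List (Int × List Int)) (N : Int) (fuel : Nat)
    (colors : List (Option Int)) (next : List Nat) :
    bLoop regions N fuel N colors next = true := by
  cases fuel with
  | zero => simp [bLoop]
  | succ f => simp [bLoop]

theorem bLoop_neg (regions : List (Int × List Int)) (N : Int) (fuel : Nat)
    (colors : List (Option Int)) (next : List Nat) (hN : 0 < N) :
    bLoop regions N fuel (-1) colors next = false := by
  cases fuel with
  | zero => simp [bLoop]; omega
  | succ f =>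
    simp only [bLoop]
    simp
    omega

-- casc, uniformly over r
theorem casc_eq (regions : List (Int × List Int)) (N : Int) (r : Nat)
    (colors : List (Option Int)) (next : List Nat) :
    casc regions N r colors next =
      (if aTry N (nbrsAt regions r) (regions.drop (r + 1)) r (colors.set r none)
            (cFrom (next.getD r 0)) then true
       else if r = 0 then false
       else casc regions N (r - 1) (colors.set r none) (next.set r 0)) := by
  cases r with
  | zero =>
    simp only [casc]
    by_cases h : aTry N (nbrsAt regions 0) (regions.drop 1) 0 (colors.set 0 none)
        (cFrom (next.getD 0 0)) = true
    · rw [h, if_pos rfl]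
    · simp at h
      simp [h]
  | succ r' => simp only [casc]; rfl

-- ---- the main correspondence: B's loop computes the A-side cascade ----
theorem aGo_cons (N : Int) (p : Int × List Int) (rest : List (Int × List Int)) (region : Nat)
    (colors : List (Option Int)) :
    aGo N (p :: rest) region colors = aTry N p.2 rest region colors [0, 1, 2, 3] := by
  obtain ⟨a, b⟩ := p
  simp [aGo]

theorem bloop_eq_casc (regions : List (Int × List Int)) :
    ∀ (fuel r : Nat) (colors : List (Option Int)) (next : List Nat),
      r < regions.length →
      next.length = regions.length →
      (∀ i, r < i → next.getD i 0 = 0) →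
      (∀ i, r < i → colors.getD i none = none) →
      (∀ i, next.getD i 0 ≤ 4) →
      mu regions.length r next < fuel →
      bLoop regions (regions.length : Int) fuel (r : Int) colors next
        = casc regions (regions.length : Int) r colors next := by
  intro fuel
  induction fuel with
  | zero => intro r colors next _ _ _ _ _ hmu; omega
  | succ fuel ih =>
    intro r colors next hr hlen hnext hcolors hle4 hmu
    have hrN : (r : Int) < (regions.length : Int) := by exact_mod_cast hr
    rw [bLoop_succ_in regions (regions.length : Int) fuel r colors next hrN]
    set colors1 := colors.set r none with hcolors1
    set c0 := next.getD r 0 with hc0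
    set cs := bScan (regions.length : Int) colors1 (nbrsAt regions r) c0 with hcs
    have hc04 : c0 ≤ 4 := hle4 r
    have hge : c0 ≤ cs := bScan_ge _ colors1 (nbrsAt regions r) (4 - c0) c0 (by omega)
    have hle : cs ≤ 4 := bScan_le _ colors1 (nbrsAt regions r) (4 - c0) c0 (by omega)
    have htry := aTry_scan (regions.length : Int) colors1 (nbrsAt regions r)
      (regions.drop (r + 1)) r (4 - c0) c0 (by omega)
    rw [← hcs] at htry
    by_cases hlt : cs < 4
    · -- forward step
      set colors2 := colors1.set r (some ((cs : Nat) : Int)) with hcolors2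
      set next2 := next.set r (cs + 1) with hnext2
      simp only [hlt, if_true]
      have htry' : aTry (regions.length : Int) (nbrsAt regions r) (regions.drop (r + 1)) r colors1 (cFrom c0)
          = (if aGo (regions.length : Int) (regions.drop (r + 1)) (r + 1) colors2 then true
             else aTry (regions.length : Int) (nbrsAt regions r) (regions.drop (r + 1)) r colors1
               (cFrom (cs + 1))) := by
        rw [htry]; simp [hlt, hcolors2]
      by_cases hr1 : r + 1 = regions.length
      · -- next region is past the end: both sides are true
        have hdrop : regions.drop (r + 1) = [] := by rw [hr1]; exact List.drop_length
        have hN1 : ((r : Int) + 1) = (regions.length : Int) := by rw [← hr1]; push_cast; ring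
        rw [hN1, bLoop_done]
        have hgo : aGo (regions.length : Int) (regions.drop (r + 1)) (r + 1) colors2 = true := by
          rw [hdrop]; simp [aGo]
        rw [casc_eq, ← hcolors1, ← hc0, htry', hgo]
        simp
      · -- next region exists: one loop step, then re-associate the cascade
        have hr1' : r + 1 < regions.length := by omega
        have hcast : ((r : Int) + 1) = (((r + 1 : Nat)) : Int) := by push_cast; ring
        rw [hcast]
        have hih := ih (r + 1) colors2 next2 hr1'
          (by rw [hnext2]; simpa using hlen)
          (by intro i hi
              rw [hnext2, getD_set_ne _ _ _ _ _ (by omega)]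
              exact hnext i (by omega))
          (by intro i hi
              rw [hcolors2, hcolors1, getD_set_ne _ _ _ _ _ (by omega),
                getD_set_ne _ _ _ _ _ (by omega)]
              exact hcolors i (by omega))
          (by intro i
              by_cases hir : i = r
              · subst hir
                rw [hnext2, getD_set_self _ _ _ _ (by omega)]
                omega
              · rw [hnext2, getD_set_ne _ _ _ _ _ (by omega)]
                exact hle4 i)
          (by have hmf := mu_forward regions.length r cs next hr hlen hge (by omega)
              rw [← hnext2] at hmf
              omega)
        rw [hih]
        have e1 : colors2.set (r + 1) none = colors2 := by
          apply set_eq_of_getD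
          rw [hcolors2, hcolors1, getD_set_ne _ _ _ _ _ (by omega),
            getD_set_ne _ _ _ _ _ (by omega)]
          exact hcolors (r + 1) (by omega)
        have e2 : next2.getD (r + 1) 0 = 0 := by
          rw [hnext2, getD_set_ne _ _ _ _ _ (by omega)]
          exact hnext (r + 1) (by omega)
        have e3 : next2.set (r + 1) 0 = next2 := by
          apply set_eq_of_getD; rw [e2]
        have hdrop : regions.drop (r + 1) = regions[r + 1] :: regions.drop (r + 2) :=
          List.drop_eq_getElem_cons hr1'
        have hnb : nbrsAt regions (r + 1) = (regions[r + 1]).2 := by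
          simp [nbrsAt, List.getElem?_eq_getElem hr1']
        have e5 : aTry (regions.length : Int) (nbrsAt regions (r + 1)) (regions.drop (r + 2))
            (r + 1) colors2 (cFrom 0)
            = aGo (regions.length : Int) (regions.drop (r + 1)) (r + 1) colors2 := by
          rw [hnb, hdrop, aGo_cons]
          rfl
        have f1 : colors2.set r none = colors1 := by
          rw [hcolors2, List.set_set, hcolors1, List.set_set]
        have f2 : next2.getD r 0 = cs + 1 := by
          rw [hnext2]; exact getD_set_self _ _ _ _ (by omega)
        have f3 : next2.set r 0 = next.set r 0 := by rw [hnext2, List.set_set]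
        rw [casc_eq regions (regions.length : Int) (r + 1) colors2 next2, e1, e2, e5]
        simp only [Nat.add_sub_cancel, e3, Nat.succ_ne_zero, if_false]
        rw [casc_eq regions (regions.length : Int) r colors2 next2, f1, f2, f3]
        rw [casc_eq regions (regions.length : Int) r colors next, ← hcolors1, ← hc0, htry']
        cases hg : aGo (regions.length : Int) (regions.drop (r + 1)) (r + 1) colors2 <;>
          cases ht : aTry (regions.length : Int) (nbrsAt regions r) (regions.drop (r + 1)) r
            colors1 (cFrom (cs + 1)) <;>
          simp
    · -- backtrack step
      simp only [hlt, if_false]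
      have hfalse : aTry (regions.length : Int) (nbrsAt regions r) (regions.drop (r + 1)) r
          colors1 (cFrom c0) = false := by
        rw [htry]; simp [hlt]
      rw [casc_eq regions (regions.length : Int) r colors next, ← hcolors1, ← hc0, hfalse]
      simp only [Bool.false_eq_true, if_false]
      cases r with
      | zero =>
        have hneg : ((0 : Nat) : Int) - 1 = (-1 : Int) := by norm_num
        rw [hneg, bLoop_neg _ _ _ _ _ (by exact_mod_cast hr)]
        simp
      | succ r' =>
        have hcast : (((r' + 1 : Nat)) : Int) - 1 = ((r' : Nat) : Int) := by push_cast; ring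
        rw [hcast]
        have hih := ih r' colors1 (next.set (r' + 1) 0) (by omega)
          (by simpa using hlen)
          (by intro i hi
              by_cases hir : i = r' + 1
              · subst hir; exact getD_set_self_default _ _ _
              · rw [getD_set_ne _ _ _ _ _ (by omega)]
                exact hnext i (by omega))
          (by intro i hi
              by_cases hir : i = r' + 1
              · subst hir; rw [hcolors1]; exact getD_set_self_default _ _ _
              · rw [hcolors1, getD_set_ne _ _ _ _ _ (by omega)]
                exact hcolors i (by omega))
          (by intro i
              by_cases hir : i = r' + 1
              · subst hir; rw [getD_set_self_default]; omega
              · rw [getD_set_ne _ _ _ _ _ (by omega)]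
                exact hle4 i)
          (by have := mu_backward regions.length r' next hr
              omega)
        rw [hih]
        simp

theorem A_eq_alt (regions : List (Int × List Int)) :
    four_color_theorem_checker regions = four_color_theorem_checker_alt regions := by
  cases hreg : regions with
  | nil =>
    unfold four_color_theorem_checker four_color_theorem_checker_alt
    have hf : (6 : Nat) ^ (([] : List (Int × List Int)).length + 2) = 35 + 1 := by norm_num
    rw [hf]
    simp [aGo, bLoop]
  | cons p rest =>
    unfold four_color_theorem_checker four_color_theorem_checker_alt
    have hlen : 0 < (p :: rest).length := by simp
    have hmain := bloop_eq_casc (p :: rest) (6 ^ ((p :: rest).length + 2)) 0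
      (List.replicate (p :: rest).length none) (List.replicate (p :: rest).length 0)
      hlen (by simp)
      (fun i _ => getD_replicate _ _ _)
      (fun i _ => getD_replicate _ _ _)
      (fun i => by rw [getD_replicate]; omega)
      (mu_init _)
    rw [show ((0 : Nat) : Int) = (0 : Int) from rfl] at hmain
    rw [hmain]
    simp only [casc]
    have g1 : (List.replicate (p :: rest).length (none : Option Int)).set 0 none
        = List.replicate (p :: rest).length none :=
      set_eq_of_getD _ _ _ (getD_replicate _ _ _)
    have g2 : (List.replicate (p :: rest).length (0 : Nat)).getD 0 0 = 0 :=
      getD_replicate _ _ _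
    rw [g1, g2]
    have g3 : nbrsAt (p :: rest) 0 = p.2 := by simp [nbrsAt]
    rw [g3, show (p :: rest).drop 1 = rest from rfl, aGo_cons]
    rfl

-- ===== VERDICT (by name: the statement is the Claim_ definition above) =====
theorem four_color_theorem_checker_spec : Claim_equal_four_color_theorem_checker := by
  unfold Claim_equal_four_color_theorem_checker
  intro regions _ _
  unfold Spec_four_color_theorem_checker
  exact A_eq_alt regions
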